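-- pv_equiv track=rewrite | github.com/nauqs/AoC24 | day05.py | part1
-- ===== SOURCE A (Python) =====
-- def part1(pairs, updates):
--     s = 0
--     for update in updates:
--         complies = True
--         L = len(update)
--         for a, b in pairs:
--             if a in update and b in update:
--                 found_a, found_b = False, False
--                 for i in range(L):
--                     if update[i] == a:
--                         found_a = True
--                     if update[i] == b:
--                         found_b = True
--                     if found_a and not found_b:
--                         break
--                     if found_b and not found_a:
--                         complies = False
--                         break
--         if complies:
--             s += update[L//2]
--     return s
-- ===== SOURCE B (Python) =====
-- def part1(pairs, updates):
--     s = 0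
--     for update in updates:
--         pos = {}
--         for i, x in enumerate(update):
--             if x not in pos:
--                 pos[x] = i
--         if all(not (a in pos and b in pos and pos[b] < pos[a]) for a, b in pairs):
--             s += update[len(update) // 2]
--     return s
-- ===== Notes on version B (the rewrite author's own statement) =====
-- stated objective: faster
-- what changed: Instead of rescanning the whole update for every rule pair with found_a/found_b flags, B builds a first-occurrence index dictionary once per update and checks each pair with two O(1) lookups.
import Mathlib
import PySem

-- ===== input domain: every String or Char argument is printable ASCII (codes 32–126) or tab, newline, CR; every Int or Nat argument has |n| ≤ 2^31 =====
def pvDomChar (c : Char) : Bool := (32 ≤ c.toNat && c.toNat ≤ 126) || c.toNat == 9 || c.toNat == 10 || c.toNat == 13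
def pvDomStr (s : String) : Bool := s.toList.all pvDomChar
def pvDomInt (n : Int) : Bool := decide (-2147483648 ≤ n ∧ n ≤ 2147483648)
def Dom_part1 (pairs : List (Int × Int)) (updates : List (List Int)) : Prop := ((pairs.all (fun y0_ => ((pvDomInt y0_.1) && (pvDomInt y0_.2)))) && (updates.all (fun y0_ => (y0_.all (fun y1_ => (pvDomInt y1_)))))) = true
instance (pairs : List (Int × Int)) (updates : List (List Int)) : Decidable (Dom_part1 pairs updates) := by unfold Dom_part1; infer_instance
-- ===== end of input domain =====

-- B replaces A's per-pair rescans of the update by one first-occurrence index built once per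
-- update, then checks each pair with two dictionary lookups (objective: faster, O(U·(P+L)) vs O(U·P·L)).

-- ===== PORT A =====
-- inner 'for i in range(L)' loop of A with its found_a/found_b flags and breaks;
-- true = loop ended without the 'complies = False' break
def scanA (a b : Int) : List Int → Bool → Bool → Bool
  | [], _, _ => true
  | x :: rest, fa, fb =>
    let fa' := if x = a then true else fa
    let fb' := if x = b then true else fb
    if fa' && !fb' then true
    else if fb' && !fa' then false
    else scanA a b rest fa' fb'

def part1 (pairs : List (Int × Int)) (updates : List (List Int)) : Int :=
  updates.foldl (fun s update =>
    let complies := pairs.foldl (fun c p =>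
      if p.1 ∈ update ∧ p.2 ∈ update then
        (if scanA p.1 p.2 update false false then c else false)
      else c) true
    if complies then s + update.getD (update.length / 2) 0 else s) 0

-- ===== PORT B =====
-- 'for i, x in enumerate(update): if x not in pos: pos[x] = i'
def buildPos (i : Int) : List Int → PySem.Dict Int Int → PySem.Dict Int Int
  | [], d => d
  | x :: rest, d =>
    let d' := if (d.get? x).isNone then d.insert x i else d
    buildPos (i + 1) rest d'

-- 'a in pos and b in pos and pos[b] < pos[a]'
def violB (pos : PySem.Dict Int Int) (p : Int × Int) : Bool :=
  match pos.get? p.1, pos.get? p.2 with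
  | some ia, some ib => decide (ib < ia)
  | _, _ => false

def part1_alt (pairs : List (Int × Int)) (updates : List (List Int)) : Int :=
  updates.foldl (fun s update =>
    let pos := buildPos 0 update PySem.Dict.empty
    if pairs.all (fun p => !violB pos p) then s + update.getD (update.length / 2) 0 else s) 0

-- ===== PRECONDITION & SPEC =====
-- Pre_ excludes an empty update list entry: there Python A raises IndexError on update[L//2].
def Pre_part1 (pairs : List (Int × Int)) (updates : List (List Int)) : Prop :=
  ∀ u ∈ updates, u ≠ []
instance (pairs : List (Int × Int)) (updates : List (List Int)) : Decidable (Pre_part1 pairs updates) := by unfold Pre_part1; infer_instance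

def pvWitness_part1 : (List (Int × Int)) × List (List Int) :=
  ([(1, 2), (3, 1)], [[1, 2, 3], [2, 1]])

def Spec_part1 (pairs : List (Int × Int)) (updates : List (List Int)) (out : Int) : Prop := out = part1_alt pairs updates
instance (pairs : List (Int × Int)) (updates : List (List Int)) (out : Int) : Decidable (Spec_part1 pairs updates out) := by unfold Spec_part1; infer_instance

-- ===== CLAIM (what is proved, stated in full; the proofs are below) =====
def Claim_equal_part1 : Prop := ∀ (pairs : List (Int × Int)) (updates : List (List Int)), Dom_part1 pairs updates → Pre_part1 pairs updates → Spec_part1 pairs updates (part1 pairs updates)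

-- ===== LEMMAS AND PROOFS =====

-- the first-occurrence dictionary built by B, characterised by List.idxOf
theorem buildPos_get? (u : List Int) (i : Int) (d : PySem.Dict Int Int) (y : Int) :
    (buildPos i u d).get? y =
      (match d.get? y with
       | some v => some v
       | none => if y ∈ u then some (i + (u.idxOf y : Int)) else none) := by
  induction u generalizing i d with
  | nil =>
    simp only [buildPos]
    cases d.get? y <;> simp
  | cons x rest ih =>
    simp only [buildPos]
    rw [ih]
    by_cases hyx : y = x
    · subst hyx
      cases hd : d.get? y with
      | some v => simp [hd, PySem.Dict.get?_insert]
      | none => simp [hd, PySem.Dict.get?_insert, List.idxOf_cons_self]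
    · have hb : (x == y) = false := by simp [Ne.symm hyx]
      have hidx : (x :: rest).idxOf y = rest.idxOf y + 1 := by
        simp [List.idxOf_cons, hb]
      cases hd : d.get? y with
      | some v =>
        by_cases hx : (d.get? x).isNone
        · simp [hx, PySem.Dict.get?_insert, hyx, hd]
        · simp [hx, hd]
      | none =>
        by_cases hx : (d.get? x).isNone
        · simp only [hx, if_pos]
          rw [PySem.Dict.get?_insert]
          simp only [hyx, if_neg, hd]
          by_cases hmem : y ∈ rest
          · simp [hmem, hyx, hidx, hd]; push_cast; ring
          · simp [hmem, hyx, hd]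
        · simp only [hx, if_neg]
          by_cases hmem : y ∈ rest
          · simp [hmem, hyx, hidx, hd]; push_cast; ring
          · simp [hmem, hyx, hd]

theorem scanA_true_true (a : Int) (u : List Int) : scanA a a u true true = true := by
  induction u with
  | nil => rfl
  | cons x rest ih => simp [scanA, ih]

theorem scanA_self (a : Int) (u : List Int) : scanA a a u false false = true := by
  induction u with
  | nil => rfl
  | cons x rest ih =>
    by_cases hx : x = a
    · simp [scanA, hx, scanA_true_true]
    · simp [scanA, hx, ih]

theorem scanA_ne (a b : Int) (hab : a ≠ b) (u : List Int) :
    scanA a b u false false = !(decide (b ∈ u) && decide (u.idxOf b < u.idxOf a)) := by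
  induction u with
  | nil => simp [scanA]
  | cons x rest ih =>
    by_cases hxa : x = a
    · subst hxa
      have hxb : x ≠ b := hab
      have hb : (x == b) = false := by simp [hxb]
      simp only [scanA, if_pos rfl, if_neg hxb]
      have h1 : (x :: rest).idxOf x = 0 := List.idxOf_cons_self
      have h2 : (x :: rest).idxOf b = rest.idxOf b + 1 := by simp [List.idxOf_cons, hb]
      simp [h1, h2]
    · by_cases hxb : x = b
      · subst hxb
        have ha : (x == a) = false := by simp [hxa]
        simp only [scanA, if_neg hxa, if_pos rfl]
        have h1 : (x :: rest).idxOf x = 0 := List.idxOf_cons_self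
        have h2 : (x :: rest).idxOf a = rest.idxOf a + 1 := by simp [List.idxOf_cons, ha]
        simp [h1, h2]
      · have ha : (x == a) = false := by simp [hxa]
        have hb : (x == b) = false := by simp [hxb]
        simp only [scanA, if_neg hxa, if_neg hxb]
        have h1 : (x :: rest).idxOf a = rest.idxOf a + 1 := by simp [List.idxOf_cons, ha]
        have h2 : (x :: rest).idxOf b = rest.idxOf b + 1 := by simp [List.idxOf_cons, hb]
        have hbx : b ≠ x := Ne.symm hxb
        simp [ih, h1, h2, hbx]

-- A's per-pair complies update as a pointwise test
def gA (u : List Int) (p : Int × Int) : Bool :=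
  if p.1 ∈ u ∧ p.2 ∈ u then scanA p.1 p.2 u false false else true

theorem foldl_and_all (g : Int × Int → Bool) (l : List (Int × Int)) (c : Bool) :
    l.foldl (fun c p => c && g p) c = (c && l.all g) := by
  induction l generalizing c with
  | nil => simp
  | cons p rest ih => simp [List.foldl_cons, ih, Bool.and_assoc]

theorem stepA_eq (u : List Int) (c : Bool) (p : Int × Int) :
    (if p.1 ∈ u ∧ p.2 ∈ u then (if scanA p.1 p.2 u false false then c else false) else c)
      = (c && gA u p) := by
  unfold gA
  by_cases h : p.1 ∈ u ∧ p.2 ∈ u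
  · by_cases hs : scanA p.1 p.2 u false false = true <;> simp [h, hs]
  · simp [h]

theorem idxOf_ne_of_mem {u : List Int} {a b : Int} (hab : a ≠ b) (ha : a ∈ u) (hb : b ∈ u) :
    u.idxOf a ≠ u.idxOf b := by
  intro h
  have h1 : u.idxOf a < u.length := List.idxOf_lt_length_of_mem ha
  have ha' : u[u.idxOf a] = a := List.getElem_idxOf h1
  have hb' : u[u.idxOf b]'(h ▸ h1) = b := List.getElem_idxOf (h ▸ h1)
  apply hab
  rw [← ha', ← hb']
  simp [h]

theorem gA_eq_not_violB (u : List Int) (p : Int × Int) :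
    gA u p = !violB (buildPos 0 u PySem.Dict.empty) p := by
  have hpos : ∀ y, (buildPos 0 u PySem.Dict.empty).get? y =
      (if y ∈ u then some ((u.idxOf y : Int)) else none) := by
    intro y
    rw [buildPos_get? u 0 PySem.Dict.empty y]
    simp [PySem.Dict.get?_empty]
  unfold gA violB
  by_cases h1 : p.1 ∈ u
  · by_cases h2 : p.2 ∈ u
    · rw [hpos p.1, hpos p.2]
      simp only [h1, h2, if_pos]
      by_cases hab : p.1 = p.2
      · rw [← hab]
        simp [scanA_self]
      · rw [scanA_ne p.1 p.2 hab u]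
        have hne := idxOf_ne_of_mem hab h1 h2
        simp only [h2, decide_true, Bool.true_and]
        have : ((u.idxOf p.2 : Int) < (u.idxOf p.1 : Int)) ↔ (u.idxOf p.2 < u.idxOf p.1) := by
          exact_mod_cast Iff.rfl
        simp [this]
    · rw [hpos p.1, hpos p.2]
      simp [h1, h2]
  · rw [hpos p.1]
    simp only [h1, if_neg, not_false_iff]
    by_cases h2 : p.2 ∈ u <;> simp [h1, h2, hpos p.2]

theorem complies_eq (pairs : List (Int × Int)) (u : List Int) :
    (pairs.foldl (fun c p =>
      if p.1 ∈ u ∧ p.2 ∈ u then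
        (if scanA p.1 p.2 u false false then c else false)
      else c) true)
    = pairs.all (fun p => !violB (buildPos 0 u PySem.Dict.empty) p) := by
  have h : (pairs.foldl (fun c p =>
      if p.1 ∈ u ∧ p.2 ∈ u then
        (if scanA p.1 p.2 u false false then c else false)
      else c) true) = pairs.foldl (fun c p => c && gA u p) true := by
    have hfun : (fun (c : Bool) (p : Int × Int) =>
        if p.1 ∈ u ∧ p.2 ∈ u then
          (if scanA p.1 p.2 u false false then c else false)
        else c) = (fun c p => c && gA u p) := by
      funext c p
      exact stepA_eq u c p
    rw [hfun]
  rw [h, foldl_and_all]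
  simp only [Bool.true_and]
  congr 1
  funext p
  exact gA_eq_not_violB u p

-- ===== VERDICT (by name: the statement is the Claim_ definition above) =====
theorem part1_spec : Claim_equal_part1 := by
  intro pairs updates hdom hpre
  unfold Spec_part1 part1 part1_alt
  clear hdom hpre
  induction updates using List.reverseRecOn with
  | nil => rfl
  | append_singleton rest u ih =>
    rw [List.foldl_append, List.foldl_append, ih]
    simp only [List.foldl_cons, List.foldl_nil]
    rw [complies_eq pairs u]
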